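-- pv_equiv track=rewrite | github.com/hugoxxxx/DataPrism | src/ui/metadata_editor_dialog.py | _smart_match_header
-- ===== SOURCE A (Python) =====
-- def _smart_match_header(header: str) -> str:
--     h = header.lower().strip()
--     if any(k in h for k in ['date', 'time']): return "DateTimeOriginal"
--     if 'lat' in h: return "GPSLatitude"
--     if any(k in h for k in ['lon', 'lng']): return "GPSLongitude"
--     if any(k in h for k in ['camera', 'body', 'model']): return "Model"
--     if 'lens' in h: return "LensModel"
--     if 'iso' in h: return "ISO"
--     if any(k in h for k in ['aperture', 'f-']): return "FNumber"
--     if any(k in h for k in ['shutter', 'speed']): return "ExposureTime"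
--     if '35mm' in h or 'equivalent' in h: return "FocalLengthIn35mmFormat"
--     if 'focal' in h: return "FocalLength"
--     if 'film' in h: return "Film"
--     return "IGNORE"
-- ===== SOURCE B (Python) =====
-- _FIELDS = ["DateTimeOriginal", "GPSLatitude", "GPSLongitude", "Model",
--            "LensModel", "ISO", "FNumber", "ExposureTime",
--            "FocalLengthIn35mmFormat", "FocalLength", "Film"]
--
-- _KEYWORDS = [("date", 0), ("time", 0), ("lat", 1), ("lon", 2), ("lng", 2),
--              ("camera", 3), ("body", 3), ("model", 3), ("lens", 4),
--              ("iso", 5), ("aperture", 6), ("f-", 6), ("shutter", 7),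
--              ("speed", 7), ("35mm", 8), ("equivalent", 8), ("focal", 9),
--              ("film", 10)]
--
--
-- def _smart_match_header(header: str) -> str:
--     # Single left-to-right scan over the string: at each position, see which
--     # keywords start there and keep the best (lowest) rule priority found.
--     h = header.lower().strip()
--     best = len(_FIELDS)
--     for i in range(len(h) + 1):
--         for kw, p in _KEYWORDS:
--             if p < best and h.startswith(kw, i):
--                 best = p
--     return _FIELDS[best] if best < len(_FIELDS) else "IGNORE"
-- ===== Notes on version B (the rewrite author's own statement) =====
-- stated objective: alternative
-- what changed: Instead of an if-chain of substring tests per rule, B makes a single left-to-right scan over the normalized header, checking at each position which keywords start there and keeping the minimum rule priority matched.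
import Mathlib
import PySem

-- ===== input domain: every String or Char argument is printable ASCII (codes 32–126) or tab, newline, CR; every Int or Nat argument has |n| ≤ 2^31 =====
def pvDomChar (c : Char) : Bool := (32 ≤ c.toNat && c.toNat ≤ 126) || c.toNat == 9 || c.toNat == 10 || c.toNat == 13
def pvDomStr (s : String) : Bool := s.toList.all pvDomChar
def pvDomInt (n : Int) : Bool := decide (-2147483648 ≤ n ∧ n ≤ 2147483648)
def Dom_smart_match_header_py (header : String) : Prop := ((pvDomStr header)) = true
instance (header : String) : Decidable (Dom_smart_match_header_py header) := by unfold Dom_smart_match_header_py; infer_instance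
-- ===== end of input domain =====

-- B replaces the if-chain of substring tests by a single left-to-right scan of the
-- normalized header that keeps the minimum rule priority of any keyword starting at
-- each position (objective: alternative); same return values.

-- ===== PORT A =====
def smart_match_header_py (header : String) : String :=
  let h := PySem.Str.strip (PySem.Str.lower header)
  if ["date", "time"].any (fun k => PySem.Str.isIn k h) then "DateTimeOriginal"
  else if PySem.Str.isIn "lat" h then "GPSLatitude"
  else if ["lon", "lng"].any (fun k => PySem.Str.isIn k h) then "GPSLongitude"
  else if ["camera", "body", "model"].any (fun k => PySem.Str.isIn k h) then "Model"
  else if PySem.Str.isIn "lens" h then "LensModel"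
  else if PySem.Str.isIn "iso" h then "ISO"
  else if ["aperture", "f-"].any (fun k => PySem.Str.isIn k h) then "FNumber"
  else if ["shutter", "speed"].any (fun k => PySem.Str.isIn k h) then "ExposureTime"
  else if PySem.Str.isIn "35mm" h || PySem.Str.isIn "equivalent" h then "FocalLengthIn35mmFormat"
  else if PySem.Str.isIn "focal" h then "FocalLength"
  else if PySem.Str.isIn "film" h then "Film"
  else "IGNORE"

-- ===== PORT B =====
def pvFields : List String :=
  ["DateTimeOriginal", "GPSLatitude", "GPSLongitude", "Model",
   "LensModel", "ISO", "FNumber", "ExposureTime",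
   "FocalLengthIn35mmFormat", "FocalLength", "Film"]

def pvKeywords : List (List Char × Nat) :=
  [("date".toList, 0), ("time".toList, 0), ("lat".toList, 1), ("lon".toList, 2),
   ("lng".toList, 2), ("camera".toList, 3), ("body".toList, 3), ("model".toList, 3),
   ("lens".toList, 4), ("iso".toList, 5), ("aperture".toList, 6), ("f-".toList, 6),
   ("shutter".toList, 7), ("speed".toList, 7), ("35mm".toList, 8),
   ("equivalent".toList, 8), ("focal".toList, 9), ("film".toList, 10)]

-- h.startswith(kw, i) with 0 ≤ i ≤ len(h) is exactly Chars.startswith on (List.drop i) of the code points.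
def smart_match_header_py_alt (header : String) : String :=
  let h := PySem.Str.strip (PySem.Str.lower header)
  let hl := h.toList
  let best := (List.range (hl.length + 1)).foldl
    (fun b i => pvKeywords.foldl
      (fun b kp => if kp.2 < b ∧ PySem.Chars.startswith (List.drop i hl) kp.1 = true then kp.2 else b) b)
    pvFields.length
  if best < pvFields.length then pvFields.getD best "IGNORE" else "IGNORE"

-- ===== PRECONDITION & SPEC =====
def Spec_smart_match_header_py (header : String) (out : String) : Prop := out = smart_match_header_py_alt header
instance (header : String) (out : String) : Decidable (Spec_smart_match_header_py header out) := by unfold Spec_smart_match_header_py; infer_instance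

-- ===== CLAIM (what is proved, stated in full; the proofs are below) =====
def Claim_equal_smart_match_header_py : Prop := ∀ (header : String), Dom_smart_match_header_py header → Spec_smart_match_header_py header (smart_match_header_py header)

-- ===== LEMMAS AND PROOFS =====

def pvStep (hl : List Char) (b : Nat) (x : Nat × (List Char × Nat)) : Nat :=
  if x.2.2 < b ∧ PySem.Chars.startswith (List.drop x.1 hl) x.2.1 = true then x.2.2 else b

def pvMatch (hl : List Char) (x : Nat × (List Char × Nat)) : Bool :=
  PySem.Chars.startswith (List.drop x.1 hl) x.2.1

def pvM (hl : List Char) : List Nat :=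
  ((((List.range (hl.length + 1)).flatMap (fun i => pvKeywords.map (fun kp => (i, kp)))).filter
    (pvMatch hl)).map (fun x => x.2.2))

theorem pvStep_min (hl : List Char) (b : Nat) (x : Nat × (List Char × Nat)) :
    pvStep hl b x = if pvMatch hl x then min x.2.2 b else b := by
  unfold pvStep pvMatch
  split_ifs with h1 h2 h2 <;> simp_all
  omega

theorem pvFoldrMinMin (l : List Nat) (a b : Nat) :
    l.foldr min (min a b) = min a (l.foldr min b) := by
  induction l with
  | nil => rfl
  | cons x t ih => simp [List.foldr, ih]; omega

theorem pvFoldEqFoldr (hl : List Char) (xs : List (Nat × (List Char × Nat))) (b : Nat) :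
    xs.foldl (pvStep hl) b = ((xs.filter (pvMatch hl)).map (fun x => x.2.2)).foldr min b := by
  induction xs generalizing b with
  | nil => rfl
  | cons x t ih =>
    rw [List.foldl_cons, ih, pvStep_min]
    by_cases hm : pvMatch hl x
    · simp [hm, pvFoldrMinMin]
    · simp [hm]

theorem pvFlatten (hl : List Char) (is : List Nat) (b : Nat) :
    is.foldl (fun b i => pvKeywords.foldl (fun b kp => pvStep hl b (i, kp)) b) b
      = (is.flatMap (fun i => pvKeywords.map (fun kp => (i, kp)))).foldl (pvStep hl) b := by
  induction is generalizing b with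
  | nil => rfl
  | cons i t ih => simp [List.foldl_append, List.foldl_map, ih]

theorem pvBestEq (hl : List Char) :
    (List.range (hl.length + 1)).foldl
      (fun b i => pvKeywords.foldl
        (fun b kp => if kp.2 < b ∧ PySem.Chars.startswith (List.drop i hl) kp.1 = true then kp.2 else b) b)
      pvFields.length
    = (pvM hl).foldr min 11 := by
  show (List.range (hl.length + 1)).foldl
      (fun b i => pvKeywords.foldl (fun b kp => pvStep hl b (i, kp)) b) 11 = _
  rw [pvFlatten, pvFoldEqFoldr]
  rfl

theorem pvFoldrMinLeMem {l : List Nat} {b x : Nat} (hx : x ∈ l) : l.foldr min b ≤ x := by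
  induction l with
  | nil => cases hx
  | cons y t ih =>
    rcases List.mem_cons.mp hx with rfl | hx
    · simp [List.foldr]
    · have := ih hx; simp [List.foldr]; omega

theorem pvLeFoldrMin {l : List Nat} {b p : Nat} (hb : p ≤ b) (h : ∀ x ∈ l, p ≤ x) :
    p ≤ l.foldr min b := by
  induction l with
  | nil => simpa
  | cons y t ih =>
    have h1 := h y (List.mem_cons_self ..)
    have h2 := ih (fun x hx => h x (List.mem_cons_of_mem _ hx))
    simp [List.foldr]; omega

theorem pvFoldrMinEq {l : List Nat} {b p : Nat} (hp : p ∈ l) (hlb : ∀ x ∈ l, p ≤ x)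
    (hpb : p ≤ b) : l.foldr min b = p :=
  Nat.le_antisymm (pvFoldrMinLeMem hp) (pvLeFoldrMin hpb hlb)

theorem pvFoldrMinEmpty {l : List Nat} {b : Nat} (h : ∀ x, x ∉ l) : l.foldr min b = b := by
  rw [List.eq_nil_iff_forall_not_mem.mpr h]
  rfl

theorem pvKwNe : ∀ kp ∈ pvKeywords, kp.1 ≠ [] := by decide

theorem pvOccIff (hl kw : List Char) (hkw : kw ≠ []) :
    (∃ i, i < hl.length + 1 ∧ PySem.Chars.startswith (List.drop i hl) kw = true)
      ↔ PySem.Chars.isIn kw hl = true := by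
  rw [← PySem.Chars.exists_prefix_drop_iff_isIn]
  constructor
  · rintro ⟨i, _, hs⟩
    exact ⟨i, (PySem.Chars.startswith_iff _ _).1 hs⟩
  · rintro ⟨j, hj⟩
    by_cases hjn : j ≤ hl.length
    · exact ⟨j, by omega, (PySem.Chars.startswith_iff _ _).2 hj⟩
    · exfalso
      rw [List.drop_eq_nil_of_le (by omega)] at hj
      exact hkw (List.prefix_nil.mp hj)

theorem pvMemMIff (hl : List Char) (q : Nat) :
    q ∈ pvM hl ↔ ∃ kp ∈ pvKeywords, kp.2 = q ∧ PySem.Chars.isIn kp.1 hl = true := by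
  unfold pvM
  simp only [List.mem_map, List.mem_filter, List.mem_flatMap, List.mem_range]
  constructor
  · rintro ⟨x, ⟨⟨i, hi, kp, hkp, rfl⟩, hm⟩, hq⟩
    exact ⟨kp, hkp, hq, (pvOccIff hl kp.1 (pvKwNe kp hkp)).1 ⟨i, hi, hm⟩⟩
  · rintro ⟨kp, hkp, hq, hin⟩
    obtain ⟨i, hi, hs⟩ := (pvOccIff hl kp.1 (pvKwNe kp hkp)).2 hin
    exact ⟨(i, kp), ⟨⟨i, hi, kp, hkp, rfl⟩, hs⟩, hq⟩

theorem pvLower (hl : List Char) (p : Nat)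
    (hfalse : ∀ kp ∈ pvKeywords, kp.2 < p → PySem.Chars.isIn kp.1 hl = false) :
    ∀ x ∈ pvM hl, p ≤ x := by
  intro x hx
  obtain ⟨kp, hkp, rfl, hin⟩ := (pvMemMIff hl x).1 hx
  by_contra hlt
  push Not at hlt
  rw [hfalse kp hkp hlt] at hin
  cases hin

theorem pvMain (hl : List Char) :
    (if PySem.Chars.isIn "date".toList hl = true ∨ PySem.Chars.isIn "time".toList hl = true then "DateTimeOriginal" else (if PySem.Chars.isIn "lat".toList hl = true then "GPSLatitude" else (if PySem.Chars.isIn "lon".toList hl = true ∨ PySem.Chars.isIn "lng".toList hl = true then "GPSLongitude" else (if PySem.Chars.isIn "camera".toList hl = true ∨ PySem.Chars.isIn "body".toList hl = true ∨ PySem.Chars.isIn "model".toList hl = true then "Model" else (if PySem.Chars.isIn "lens".toList hl = true then "LensModel" else (if PySem.Chars.isIn "iso".toList hl = true then "ISO" else (if PySem.Chars.isIn "aperture".toList hl = true ∨ PySem.Chars.isIn "f-".toList hl = true then "FNumber" else (if PySem.Chars.isIn "shutter".toList hl = true ∨ PySem.Chars.isIn "speed".toList hl = true then "ExposureTime" else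 (if PySem.Chars.isIn "35mm".toList hl = true ∨ PySem.Chars.isIn "equivalent".toList hl = true then "FocalLengthIn35mmFormat" else (if PySem.Chars.isIn "focal".toList hl = true then "FocalLength" else (if PySem.Chars.isIn "film".toList hl = true then "Film" else "IGNORE")))))))))))
    = (if (pvM hl).foldr min 11 < pvFields.length then pvFields.getD ((pvM hl).foldr min 11) "IGNORE" else "IGNORE") := by
  by_cases c0 : PySem.Chars.isIn "date".toList hl = true ∨ PySem.Chars.isIn "time".toList hl = true
  · rw [if_pos c0]
    have hmem : 0 ∈ pvM hl := by
      rcases c0 with h | h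
      · exact (pvMemMIff hl 0).2 ⟨("date".toList, 0), by simp [pvKeywords], rfl, h⟩
      · exact (pvMemMIff hl 0).2 ⟨("time".toList, 0), by simp [pvKeywords], rfl, h⟩
    rw [pvFoldrMinEq hmem (pvLower hl 0 (by intro kp hkp hlt; fin_cases hkp <;> simp_all)) (by omega)]
    rfl
  · rw [if_neg c0]
    by_cases c1 : PySem.Chars.isIn "lat".toList hl = true
    · rw [if_pos c1]
      have hmem : 1 ∈ pvM hl := by
        exact (pvMemMIff hl 1).2 ⟨("lat".toList, 1), by simp [pvKeywords], rfl, c1⟩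
      rw [pvFoldrMinEq hmem (pvLower hl 1 (by intro kp hkp hlt; fin_cases hkp <;> simp_all)) (by omega)]
      rfl
    · rw [if_neg c1]
      by_cases c2 : PySem.Chars.isIn "lon".toList hl = true ∨ PySem.Chars.isIn "lng".toList hl = true
      · rw [if_pos c2]
        have hmem : 2 ∈ pvM hl := by
          rcases c2 with h | h
          · exact (pvMemMIff hl 2).2 ⟨("lon".toList, 2), by simp [pvKeywords], rfl, h⟩
          · exact (pvMemMIff hl 2).2 ⟨("lng".toList, 2), by simp [pvKeywords], rfl, h⟩
        rw [pvFoldrMinEq hmem (pvLower hl 2 (by intro kp hkp hlt; fin_cases hkp <;> simp_all)) (by omega)]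
        rfl
      · rw [if_neg c2]
        by_cases c3 : PySem.Chars.isIn "camera".toList hl = true ∨ PySem.Chars.isIn "body".toList hl = true ∨ PySem.Chars.isIn "model".toList hl = true
        · rw [if_pos c3]
          have hmem : 3 ∈ pvM hl := by
            rcases c3 with h | h | h
            · exact (pvMemMIff hl 3).2 ⟨("camera".toList, 3), by simp [pvKeywords], rfl, h⟩
            · exact (pvMemMIff hl 3).2 ⟨("body".toList, 3), by simp [pvKeywords], rfl, h⟩
            · exact (pvMemMIff hl 3).2 ⟨("model".toList, 3), by simp [pvKeywords], rfl, h⟩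
          rw [pvFoldrMinEq hmem (pvLower hl 3 (by intro kp hkp hlt; fin_cases hkp <;> simp_all)) (by omega)]
          rfl
        · rw [if_neg c3]
          by_cases c4 : PySem.Chars.isIn "lens".toList hl = true
          · rw [if_pos c4]
            have hmem : 4 ∈ pvM hl := by
              exact (pvMemMIff hl 4).2 ⟨("lens".toList, 4), by simp [pvKeywords], rfl, c4⟩
            rw [pvFoldrMinEq hmem (pvLower hl 4 (by intro kp hkp hlt; fin_cases hkp <;> simp_all)) (by omega)]
            rfl
          · rw [if_neg c4]
            by_cases c5 : PySem.Chars.isIn "iso".toList hl = true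
            · rw [if_pos c5]
              have hmem : 5 ∈ pvM hl := by
                exact (pvMemMIff hl 5).2 ⟨("iso".toList, 5), by simp [pvKeywords], rfl, c5⟩
              rw [pvFoldrMinEq hmem (pvLower hl 5 (by intro kp hkp hlt; fin_cases hkp <;> simp_all)) (by omega)]
              rfl
            · rw [if_neg c5]
              by_cases c6 : PySem.Chars.isIn "aperture".toList hl = true ∨ PySem.Chars.isIn "f-".toList hl = true
              · rw [if_pos c6]
                have hmem : 6 ∈ pvM hl := by
                  rcases c6 with h | h
                  · exact (pvMemMIff hl 6).2 ⟨("aperture".toList, 6), by simp [pvKeywords], rfl, h⟩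
                  · exact (pvMemMIff hl 6).2 ⟨("f-".toList, 6), by simp [pvKeywords], rfl, h⟩
                rw [pvFoldrMinEq hmem (pvLower hl 6 (by intro kp hkp hlt; fin_cases hkp <;> simp_all)) (by omega)]
                rfl
              · rw [if_neg c6]
                by_cases c7 : PySem.Chars.isIn "shutter".toList hl = true ∨ PySem.Chars.isIn "speed".toList hl = true
                · rw [if_pos c7]
                  have hmem : 7 ∈ pvM hl := by
                    rcases c7 with h | h
                    · exact (pvMemMIff hl 7).2 ⟨("shutter".toList, 7), by simp [pvKeywords], rfl, h⟩
                    · exact (pvMemMIff hl 7).2 ⟨("speed".toList, 7), by simp [pvKeywords], rfl, h⟩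
                  rw [pvFoldrMinEq hmem (pvLower hl 7 (by intro kp hkp hlt; fin_cases hkp <;> simp_all)) (by omega)]
                  rfl
                · rw [if_neg c7]
                  by_cases c8 : PySem.Chars.isIn "35mm".toList hl = true ∨ PySem.Chars.isIn "equivalent".toList hl = true
                  · rw [if_pos c8]
                    have hmem : 8 ∈ pvM hl := by
                      rcases c8 with h | h
                      · exact (pvMemMIff hl 8).2 ⟨("35mm".toList, 8), by simp [pvKeywords], rfl, h⟩
                      · exact (pvMemMIff hl 8).2 ⟨("equivalent".toList, 8), by simp [pvKeywords], rfl, h⟩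
                    rw [pvFoldrMinEq hmem (pvLower hl 8 (by intro kp hkp hlt; fin_cases hkp <;> simp_all)) (by omega)]
                    rfl
                  · rw [if_neg c8]
                    by_cases c9 : PySem.Chars.isIn "focal".toList hl = true
                    · rw [if_pos c9]
                      have hmem : 9 ∈ pvM hl := by
                        exact (pvMemMIff hl 9).2 ⟨("focal".toList, 9), by simp [pvKeywords], rfl, c9⟩
                      rw [pvFoldrMinEq hmem (pvLower hl 9 (by intro kp hkp hlt; fin_cases hkp <;> simp_all)) (by omega)]
                      rfl
                    · rw [if_neg c9]
                      by_cases c10 : PySem.Chars.isIn "film".toList hl = true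
                      · rw [if_pos c10]
                        have hmem : 10 ∈ pvM hl := by
                          exact (pvMemMIff hl 10).2 ⟨("film".toList, 10), by simp [pvKeywords], rfl, c10⟩
                        rw [pvFoldrMinEq hmem (pvLower hl 10 (by intro kp hkp hlt; fin_cases hkp <;> simp_all)) (by omega)]
                        rfl
                      · rw [if_neg c10]
                        rw [pvFoldrMinEmpty (by
                            intro x hx
                            obtain ⟨kp, hkp, rfl, hin⟩ := (pvMemMIff hl x).1 hx
                            fin_cases hkp <;> simp_all)]
                        rfl

-- ===== VERDICT (by name: the statement is the Claim_ definition above) =====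
theorem smart_match_header_py_spec : Claim_equal_smart_match_header_py := by
  intro header _
  unfold Spec_smart_match_header_py smart_match_header_py smart_match_header_py_alt
  simp only [List.any_cons, List.any_nil, Bool.or_false, PySem.Str.isIn_eq, Bool.or_eq_true]
  rw [pvBestEq]
  exact pvMain _
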